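-- pv_equiv track=rewrite | github.com/greatstrength/i-engine | app/domain/factories/reading.py | create_reading_input
-- ===== SOURCE A (Python) =====
-- from typing import List
--
-- def create_reading_input(input: str, dimension: str) -> List[List[int]]:
--     if dimension in ['2', '2.1', '2.2', '6', '8']:
--         result = []
--         for i in range(0, 18, 3):
--             row = [int(input[i]), int(input[i + 1]), int(input[i + 2])]
--             result.append(row)
--         return result
--     elif dimension in ['49']:
--         result = []
--         for i in range(0, 36, 6):
--             row = [int(input[i] + input[i + 1]),
--                    int(input[i + 2] + input[i + 3]),
--                    int(input[i + 4] + input[i + 5])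
--                    ]
--             result.append(row)
--         return result
--
--     input = [list(map(int, list(x))) for x in input]
--     return input
-- ===== SOURCE B (Python) =====
-- def _cells(s, w):
--     # split s into width-w chunks (front to back), parse each with int
--     if not s:
--         return []
--     return [int(s[:w])] + _cells(s[w:], w)
--
--
-- def _rows(cells):
--     # group consecutive triples of cells into rows
--     if not cells:
--         return []
--     return [cells[:3]] + _rows(cells[3:])
--
--
-- def create_reading_input(input, dimension):
--     if dimension in ('2', '2.1', '2.2', '6', '8', '49'):
--         w = 2 if dimension == '49' else 1
--         return _rows(_cells(input[:18 * w], w))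
--     return [[int(ch)] for ch in input]
-- ===== Notes on version B (the rewrite author's own statement) =====
-- stated objective: alternative
-- what changed: Replaces A's two index-literal loops (explicit ranges with neighbour-index concatenation) by a staged recursive pipeline with no index arithmetic: slice the 18*w-char prefix, recursively split it front-to-back into width-w chunks parsed by int, then recursively group consecutive cell triples into rows; the generic fallback stays a per-char parse; Pre_ excludes inputs where A raises (IndexError on short input, ValueError on unparseable chunks).
import Mathlib
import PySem

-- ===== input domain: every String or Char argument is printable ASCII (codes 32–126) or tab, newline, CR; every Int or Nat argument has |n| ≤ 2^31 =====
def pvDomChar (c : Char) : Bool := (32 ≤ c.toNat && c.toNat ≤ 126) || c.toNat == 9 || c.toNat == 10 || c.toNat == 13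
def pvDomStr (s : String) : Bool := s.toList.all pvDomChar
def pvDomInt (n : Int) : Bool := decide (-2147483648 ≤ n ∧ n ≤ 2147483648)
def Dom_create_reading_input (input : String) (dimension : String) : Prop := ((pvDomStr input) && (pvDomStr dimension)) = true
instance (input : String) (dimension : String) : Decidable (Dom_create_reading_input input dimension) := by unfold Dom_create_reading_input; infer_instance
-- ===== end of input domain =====

-- ===== PORT A =====
-- B restructures the parse as a recursive chunk/parse/group pipeline (objective: alternative);
-- return values agree on all of Pre_.

-- int(input[i]) : IndexError/ValueError become `none`, flattened with getD 0 (never hit inside Pre_)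
def pvAInt1 (cs : List Char) (i : Int) : Int :=
  ((PySem.List.pyGet? cs i).bind (fun c => PySem.Int.ofChars? [c])).getD 0

-- int(input[i] + input[j]) : string concatenation of two indexed chars, then int()
def pvAInt2 (cs : List Char) (i j : Int) : Int :=
  match PySem.List.pyGet? cs i, PySem.List.pyGet? cs j with
  | some a, some b => (PySem.Int.ofChars? [a, b]).getD 0
  | _, _ => 0

def create_reading_input (input : String) (dimension : String) : List (List Int) :=
  if ["2", "2.1", "2.2", "6", "8"].contains dimension then
    (PySem.List.pyRange 0 18 3).foldl (fun result i =>
      result ++ [[pvAInt1 input.toList i, pvAInt1 input.toList (i + 1), pvAInt1 input.toList (i + 2)]]) []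
  else if ["49"].contains dimension then
    (PySem.List.pyRange 0 36 6).foldl (fun result i =>
      result ++ [[pvAInt2 input.toList i (i + 1), pvAInt2 input.toList (i + 2) (i + 3),
                  pvAInt2 input.toList (i + 4) (i + 5)]]) []
  else
    input.toList.map (fun x => [x].map (fun ch => (PySem.Int.ofChars? [ch]).getD 0))

-- ===== PORT B =====
-- _cells(s, w): recursively split s into width-w chunks, int() each; int(s[:w]) raising → getD 0
-- (never hit inside Pre_).  The fuel argument only bounds the recursion (Python recurses unboundedly
-- but terminates on every call B makes, consuming ≥ 1 char per step, so fuel = s.length suffices).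
def pvCells : Nat → List Char → Int → List Int
  | 0, _, _ => []
  | _, [], _ => []
  | Nat.succ f, c :: cs, w =>
      (PySem.Int.ofChars? (PySem.List.slice (c :: cs) none (some w))).getD 0 ::
        pvCells f (PySem.List.slice (c :: cs) (some w) none) w

-- _rows(cells): recursively group consecutive triples; fuel = cells.length bounds the recursion
def pvRows : Nat → List Int → List (List Int)
  | 0, _ => []
  | _, [] => []
  | Nat.succ f, c :: cs =>
      PySem.List.slice (c :: cs) none (some 3) ::
        pvRows f (PySem.List.slice (c :: cs) (some 3) none)

def create_reading_input_alt (input : String) (dimension : String) : List (List Int) :=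
  if ["2", "2.1", "2.2", "6", "8", "49"].contains dimension then
    let w : Int := if dimension == "49" then 2 else 1
    let p := PySem.List.slice input.toList none (some (18 * w))
    pvRows p.length (pvCells p.length p w)
  else
    input.toList.map (fun ch => [(PySem.Int.ofChars? [ch]).getD 0])

-- ===== PRECONDITION & SPEC =====
-- Pre_ holds exactly where Python A returns: it excludes only the inputs on which A
-- raises (IndexError: input shorter than the fixed grid; ValueError: a chunk int() rejects).
def Pre_create_reading_input (input : String) (dimension : String) : Prop :=
  if ["2", "2.1", "2.2", "6", "8"].contains dimension then
    18 ≤ input.toList.length ∧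
      ∀ k ∈ List.range 18, (PySem.Int.ofChars? [input.toList.getD k ' ']).isSome
  else if dimension == "49" then
    36 ≤ input.toList.length ∧
      ∀ r ∈ List.range 18,
        (PySem.Int.ofChars? [input.toList.getD (2 * r) ' ', input.toList.getD (2 * r + 1) ' ']).isSome
  else
    ∀ c ∈ input.toList, (PySem.Int.ofChars? [c]).isSome
instance (input : String) (dimension : String) : Decidable (Pre_create_reading_input input dimension) := by
  unfold Pre_create_reading_input; infer_instance

def pvWitness_create_reading_input : String × String := ("123456789012345678", "2")

def Spec_create_reading_input (input : String) (dimension : String) (out : List (List Int)) : Prop := out = create_reading_input_alt input dimension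
instance (input : String) (dimension : String) (out : List (List Int)) : Decidable (Spec_create_reading_input input dimension out) := by unfold Spec_create_reading_input; infer_instance

-- ===== CLAIM (what is proved, stated in full; the proofs are below) =====
def Claim_equal_create_reading_input : Prop := ∀ (input : String) (dimension : String), Dom_create_reading_input input dimension → Pre_create_reading_input input dimension → Spec_create_reading_input input dimension (create_reading_input input dimension)

-- ===== LEMMAS AND PROOFS =====

lemma pv_take_one_drop (cs : List Char) (k : Nat) (h : k < cs.length) :
    (cs.drop k).take 1 = [cs[k]] := by
  rw [List.take_one]
  simp [List.head?_drop, List.getElem?_eq_getElem h]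

lemma pv_take_two_drop (cs : List Char) (k : Nat) (h : k + 1 < cs.length) :
    (cs.drop k).take 2 = [cs[k], cs[k + 1]] := by
  rw [List.drop_eq_getElem_cons (by omega : k < cs.length),
      List.drop_eq_getElem_cons (by omega : k + 1 < cs.length)]
  rfl

-- the chunk taken from the 18w-prefix is the chunk taken from the full string
lemma pv_take_head (cs : List Char) (N w : Nat) (h : w ≤ N) :
    (cs.take N).take w = cs.take w := by
  rw [List.take_take]; congr 1; omega

lemma pv_take_chunk (cs : List Char) (N k w : Nat) (h : k + w ≤ N) :
    ((cs.take N).drop k).take w = (cs.drop k).take w := by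
  rw [List.drop_take, List.take_take]
  congr 1; omega

lemma pv_cells_one (n : Nat) : ∀ (s : List Char) (f : Nat), s.length = n → n ≤ f →
    pvCells f s 1 = (List.range n).map (fun i => (PySem.Int.ofChars? ((s.drop i).take 1)).getD 0) := by
  induction n with
  | zero =>
    intro s f hs _
    rw [List.length_eq_zero_iff] at hs
    subst hs
    cases f <;> simp [pvCells]
  | succ n ih =>
    intro s f hs hf
    cases s with
    | nil => simp at hs
    | cons c s' =>
      cases f with
      | zero => omega
      | succ f' =>
        rw [pvCells, PySem.List.slice_to, PySem.List.slice_from]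
        simp only [Int.toNat_one, List.take_succ_cons, List.take_zero, List.drop_succ_cons,
          List.drop_zero]
        rw [ih s' f' (by simpa using hs) (by omega), List.range_succ_eq_map]
        simp [List.map_map, Function.comp_def]
        all_goals decide

lemma pv_cells_two (n : Nat) : ∀ (s : List Char) (f : Nat), s.length = 2 * n → n ≤ f →
    pvCells f s 2 = (List.range n).map (fun i => (PySem.Int.ofChars? ((s.drop (2 * i)).take 2)).getD 0) := by
  induction n with
  | zero =>
    intro s f hs _
    rw [(by omega : 2 * 0 = 0), List.length_eq_zero_iff] at hs
    subst hs
    cases f <;> simp [pvCells]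
  | succ n ih =>
    intro s f hs hf
    cases s with
    | nil => simp at hs
    | cons c s' =>
      cases f with
      | zero => omega
      | succ f' =>
        rw [pvCells, PySem.List.slice_to, PySem.List.slice_from]
        · have h2 : (2 : Int).toNat = 2 := rfl
          have hd : List.drop 2 (c :: s') = List.drop 1 s' := rfl
          rw [h2, hd, ih (s'.drop 1) f' (by simp at hs ⊢; omega) (by omega),
              List.range_succ_eq_map]
          simp only [List.map_cons, List.map_map, Function.comp_def, List.drop_drop,
            Nat.mul_zero, List.drop_zero]
          congr 1
          apply List.map_congr_left
          intro a _
          rw [(by omega : 2 * a.succ = 2 * a + 1 + 1), List.drop_succ_cons, Nat.add_comm 1 (2 * a)]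
        · decide
        · decide

-- unfolding pvRows on the two concrete shapes B produces
lemma pv_rows_18 (a0 a1 a2 a3 a4 a5 a6 a7 a8 a9 a10 a11 a12 a13 a14 a15 a16 a17 : Int) :
    pvRows 18 [a0, a1, a2, a3, a4, a5, a6, a7, a8, a9, a10, a11, a12, a13, a14, a15, a16, a17] =
      [[a0, a1, a2], [a3, a4, a5], [a6, a7, a8], [a9, a10, a11], [a12, a13, a14], [a15, a16, a17]] := by
  rfl

lemma pv_rows_36 (a0 a1 a2 a3 a4 a5 a6 a7 a8 a9 a10 a11 a12 a13 a14 a15 a16 a17 : Int) :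
    pvRows 36 [a0, a1, a2, a3, a4, a5, a6, a7, a8, a9, a10, a11, a12, a13, a14, a15, a16, a17] =
      [[a0, a1, a2], [a3, a4, a5], [a6, a7, a8], [a9, a10, a11], [a12, a13, a14], [a15, a16, a17]] := by
  rfl

lemma pv_entry1 (cs : List Char) (a : Int) (k : Nat) (hk : a = (k : Int)) (h : k < cs.length) :
    pvAInt1 cs a = (PySem.Int.ofChars? ((cs.drop k).take 1)).getD 0 := by
  subst hk
  rw [pvAInt1, PySem.List.pyGet?_natCast, List.getElem?_eq_getElem h, pv_take_one_drop cs k h]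
  rfl

lemma pv_entry2 (cs : List Char) (a b : Int) (k : Nat) (hk : a = (k : Int)) (hb : b = a + 1)
    (h : k + 1 < cs.length) :
    pvAInt2 cs a b = (PySem.Int.ofChars? ((cs.drop k).take 2)).getD 0 := by
  subst hk hb
  have h1 : ((k : Int) + 1) = ((k + 1 : Nat) : Int) := by push_cast; ring
  rw [pvAInt2, h1, PySem.List.pyGet?_natCast, PySem.List.pyGet?_natCast,
      List.getElem?_eq_getElem (by omega : k < cs.length), List.getElem?_eq_getElem h,
      pv_take_two_drop cs k h]

-- ===== VERDICT (by name: the statement is the Claim_ definition above) =====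
theorem create_reading_input_spec : Claim_equal_create_reading_input := by
  intro input dimension _ hpre
  unfold Spec_create_reading_input create_reading_input create_reading_input_alt
  unfold Pre_create_reading_input at hpre
  cases hc : ["2", "2.1", "2.2", "6", "8"].contains dimension with
  | true =>
    have h49 : (dimension == "49") = false := by
      simp only [List.contains_eq_mem, List.mem_cons, decide_eq_true_eq] at hc
      rcases hc with rfl | rfl | rfl | rfl | rfl | h <;> first | rfl | simp at h
    have hc6 : ["2", "2.1", "2.2", "6", "8", "49"].contains dimension = true := by
      simp only [List.contains_eq_mem, List.mem_cons, decide_eq_true_eq] at hc ⊢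
      tauto
    simp only [hc, hc6, h49, Bool.false_eq_true, if_true, if_false] at hpre ⊢
    obtain ⟨hlen, -⟩ := hpre
    rw [(by norm_num : (18 : Int) * 1 = ((18 : Nat) : Int)), PySem.List.slice_to_natCast]
    have hplen : (input.toList.take 18).length = 18 := by
      rw [List.length_take]; omega
    rw [hplen,
        pv_cells_one 18 (input.toList.take 18) 18 hplen (le_refl _),
        (by decide : List.range 18 = [0, 1, 2, 3, 4, 5, 6, 7, 8, 9, 10, 11, 12, 13, 14, 15, 16, 17])]
    simp only [List.map_cons, List.map_nil]
    rw [pv_take_chunk _ 18 0 1 (by omega), pv_take_chunk _ 18 1 1 (by omega),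
        pv_take_chunk _ 18 2 1 (by omega), pv_take_chunk _ 18 3 1 (by omega),
        pv_take_chunk _ 18 4 1 (by omega), pv_take_chunk _ 18 5 1 (by omega),
        pv_take_chunk _ 18 6 1 (by omega), pv_take_chunk _ 18 7 1 (by omega),
        pv_take_chunk _ 18 8 1 (by omega), pv_take_chunk _ 18 9 1 (by omega),
        pv_take_chunk _ 18 10 1 (by omega), pv_take_chunk _ 18 11 1 (by omega),
        pv_take_chunk _ 18 12 1 (by omega), pv_take_chunk _ 18 13 1 (by omega),
        pv_take_chunk _ 18 14 1 (by omega), pv_take_chunk _ 18 15 1 (by omega),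
        pv_take_chunk _ 18 16 1 (by omega), pv_take_chunk _ 18 17 1 (by omega),
        pv_rows_18]
    rw [(by decide : PySem.List.pyRange 0 18 3 = [0, 3, 6, 9, 12, 15])]
    simp only [List.foldl]
    norm_num
    rw [pv_entry1 _ 0 0 (by norm_num) (by omega), pv_entry1 _ 1 1 (by norm_num) (by omega),
        pv_entry1 _ 2 2 (by norm_num) (by omega), pv_entry1 _ 3 3 (by norm_num) (by omega),
        pv_entry1 _ 4 4 (by norm_num) (by omega), pv_entry1 _ 5 5 (by norm_num) (by omega),
        pv_entry1 _ 6 6 (by norm_num) (by omega), pv_entry1 _ 7 7 (by norm_num) (by omega),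
        pv_entry1 _ 8 8 (by norm_num) (by omega), pv_entry1 _ 9 9 (by norm_num) (by omega),
        pv_entry1 _ 10 10 (by norm_num) (by omega), pv_entry1 _ 11 11 (by norm_num) (by omega),
        pv_entry1 _ 12 12 (by norm_num) (by omega), pv_entry1 _ 13 13 (by norm_num) (by omega),
        pv_entry1 _ 14 14 (by norm_num) (by omega), pv_entry1 _ 15 15 (by norm_num) (by omega),
        pv_entry1 _ 16 16 (by norm_num) (by omega), pv_entry1 _ 17 17 (by norm_num) (by omega)]
    simp
  | false =>
    cases h49 : dimension == "49" with
    | true =>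
      have hdim : dimension = "49" := by simpa using h49
      subst hdim
      simp only [hc] at hpre
      simp only [if_false, Bool.false_eq_true] at hpre ⊢
      rw [if_pos (by simp)] at hpre
      obtain ⟨hlen, -⟩ := hpre
      simp only [(by decide : (["49"].contains "49") = true),
        (by decide : (["2", "2.1", "2.2", "6", "8", "49"].contains "49") = true), if_true]
      rw [(by norm_num : (18 : Int) * 2 = ((36 : Nat) : Int)), PySem.List.slice_to_natCast]
      have hplen : (input.toList.take 36).length = 36 := by
        rw [List.length_take]; omega
      rw [hplen,
          pv_cells_two 18 (input.toList.take 36) 36 (by omega) (by omega),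
          (by decide : List.range 18 = [0, 1, 2, 3, 4, 5, 6, 7, 8, 9, 10, 11, 12, 13, 14, 15, 16, 17])]
      simp only [List.map_cons, List.map_nil]
      norm_num
      rw [pv_take_head _ 36 2 (by omega), pv_take_chunk _ 36 2 2 (by omega),
          pv_take_chunk _ 36 4 2 (by omega), pv_take_chunk _ 36 6 2 (by omega),
          pv_take_chunk _ 36 8 2 (by omega), pv_take_chunk _ 36 10 2 (by omega),
          pv_take_chunk _ 36 12 2 (by omega), pv_take_chunk _ 36 14 2 (by omega),
          pv_take_chunk _ 36 16 2 (by omega), pv_take_chunk _ 36 18 2 (by omega),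
          pv_take_chunk _ 36 20 2 (by omega), pv_take_chunk _ 36 22 2 (by omega),
          pv_take_chunk _ 36 24 2 (by omega), pv_take_chunk _ 36 26 2 (by omega),
          pv_take_chunk _ 36 28 2 (by omega), pv_take_chunk _ 36 30 2 (by omega),
          pv_take_chunk _ 36 32 2 (by omega), pv_take_chunk _ 36 34 2 (by omega),
          pv_rows_36]
      rw [(by decide : PySem.List.pyRange 0 36 6 = [0, 6, 12, 18, 24, 30])]
      norm_num
      rw [pv_entry2 _ 0 1 0 (by norm_num) (by norm_num) (by omega),
          pv_entry2 _ 2 3 2 (by norm_num) (by norm_num) (by omega),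
          pv_entry2 _ 4 5 4 (by norm_num) (by norm_num) (by omega),
          pv_entry2 _ 6 7 6 (by norm_num) (by norm_num) (by omega),
          pv_entry2 _ 8 9 8 (by norm_num) (by norm_num) (by omega),
          pv_entry2 _ 10 11 10 (by norm_num) (by norm_num) (by omega),
          pv_entry2 _ 12 13 12 (by norm_num) (by norm_num) (by omega),
          pv_entry2 _ 14 15 14 (by norm_num) (by norm_num) (by omega),
          pv_entry2 _ 16 17 16 (by norm_num) (by norm_num) (by omega),
          pv_entry2 _ 18 19 18 (by norm_num) (by norm_num) (by omega),
          pv_entry2 _ 20 21 20 (by norm_num) (by norm_num) (by omega),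
          pv_entry2 _ 22 23 22 (by norm_num) (by norm_num) (by omega),
          pv_entry2 _ 24 25 24 (by norm_num) (by norm_num) (by omega),
          pv_entry2 _ 26 27 26 (by norm_num) (by norm_num) (by omega),
          pv_entry2 _ 28 29 28 (by norm_num) (by norm_num) (by omega),
          pv_entry2 _ 30 31 30 (by norm_num) (by norm_num) (by omega),
          pv_entry2 _ 32 33 32 (by norm_num) (by norm_num) (by omega),
          pv_entry2 _ 34 35 34 (by norm_num) (by norm_num) (by omega)]
      simp
    | false =>
      have h49' : dimension ≠ "49" := by simpa using h49
      have hc6 : ["2", "2.1", "2.2", "6", "8", "49"].contains dimension = false := by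
        simp only [List.contains_eq_mem, decide_eq_false_iff_not, List.mem_cons,
          List.not_mem_nil, or_false] at hc ⊢
        tauto
      have h49c : ["49"].contains dimension = false := by simp [h49']
      simp only [hc6, h49c, Bool.false_eq_true, if_false]
      simp
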